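-- pv_equiv track=rewrite | github.com/king050611/Network-Security | Assessment/RSA/RSA/utils.py | split_message_to_int_blocks
-- ===== SOURCE A (Python) =====
-- def max_plaintext_bytes(n: int) -> int:
--     # We avoid equality to n; using floor((log2(n)-1)/8)
--     return max(1, (n.bit_length() - 1) // 8)
--
-- def split_message_to_int_blocks(message: str, n: int) -> list[int]:
--     data = message.encode("utf-8")
--     block_size = max_plaintext_bytes(n)
--     blocks = []
--     for i in range(0, len(data), block_size):
--         chunk = data[i:i + block_size]
--         blocks.append(int.from_bytes(chunk, byteorder="big"))
--     if not blocks: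
--         blocks = [0]
--     return blocks
-- ===== SOURCE B (Python) =====
-- def split_message_to_int_blocks(message: str, n: int) -> list[int]:
--     data = message.encode("utf-8")
--     block_size = max(1, (n.bit_length() - 1) // 8)
--     blocks = []
--     acc = 0
--     cnt = 0
--     for byte in data:
--         acc = acc * 256 + byte
--         cnt += 1
--         if cnt == block_size:
--             blocks.append(acc)
--             acc = 0
--             cnt = 0
--     if cnt:
--         blocks.append(acc)
--     return blocks if blocks else [0]
-- ===== Notes on version B (the rewrite author's own statement) =====
-- stated objective: alternative
-- what changed: B replaces the index-range loop with per-chunk slicing and int.from_bytes by a single pass over the individual bytes that maintains a running big-endian accumulator and a byte counter, flushing a block when the counter reaches block_size and once more for a trailing partial block.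
import Mathlib
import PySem

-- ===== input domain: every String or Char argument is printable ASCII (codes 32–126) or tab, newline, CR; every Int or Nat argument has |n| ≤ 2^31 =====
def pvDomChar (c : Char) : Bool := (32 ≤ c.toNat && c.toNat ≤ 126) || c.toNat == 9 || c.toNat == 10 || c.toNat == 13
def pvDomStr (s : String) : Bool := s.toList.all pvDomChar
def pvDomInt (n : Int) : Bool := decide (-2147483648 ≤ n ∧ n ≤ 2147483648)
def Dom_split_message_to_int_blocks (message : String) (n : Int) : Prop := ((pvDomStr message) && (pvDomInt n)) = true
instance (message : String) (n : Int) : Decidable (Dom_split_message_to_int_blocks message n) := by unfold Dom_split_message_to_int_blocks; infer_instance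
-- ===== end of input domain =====

-- B replaces A's index-range loop with per-chunk slice + int.from_bytes by a single byte-wise
-- pass with a running big-endian accumulator and byte counter (alternative decomposition, same cost).


-- ===== PORT A =====
-- int.from_bytes(chunk, byteorder="big")
def pyFromBytesBE (l : List Int) : Int := l.foldl (fun a b => a * 256 + b) 0

def max_plaintext_bytes (n : Int) : Int :=
  max 1 (PySem.Int.floordiv ((PySem.Int.bitLength n : Int) - 1) 8)

def split_message_to_int_blocks (message : String) (n : Int) : List Int :=
  -- message.encode("utf-8"): exact on the ASCII domain (every admitted char is one byte = its code)
  let data : List Int := message.toList.map (fun c => (c.toNat : Int))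
  let block_size := max_plaintext_bytes n
  let blocks := (PySem.List.pyRange 0 (data.length : Int) block_size).foldl
      (fun acc i => acc ++ [pyFromBytesBE (PySem.List.slice data (some i) (some (i + block_size)))]) []
  if blocks = [] then [0] else blocks

-- ===== PORT B =====
-- the body of B's for-loop: acc = acc*256 + byte; cnt += 1; flush when cnt == block_size
def bstep (bs : Int) (s : List Int × Int × Int) (b : Int) : List Int × Int × Int :=
  let acc := s.2.1 * 256 + b
  let cnt := s.2.2 + 1
  if cnt = bs then (s.1 ++ [acc], 0, 0) else (s.1, acc, cnt)

def split_message_to_int_blocks_alt (message : String) (n : Int) : List Int :=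
  let data : List Int := message.toList.map (fun c => (c.toNat : Int))
  let block_size := max 1 (PySem.Int.floordiv ((PySem.Int.bitLength n : Int) - 1) 8)
  let st := data.foldl (bstep block_size) ([], 0, 0)
  let blocks := if st.2.2 = 0 then st.1 else st.1 ++ [st.2.1]
  if blocks = [] then [0] else blocks

-- ===== PRECONDITION & SPEC =====
def Spec_split_message_to_int_blocks (message : String) (n : Int) (out : List Int) : Prop := out = split_message_to_int_blocks_alt message n
instance (message : String) (n : Int) (out : List Int) : Decidable (Spec_split_message_to_int_blocks message n out) := by unfold Spec_split_message_to_int_blocks; infer_instance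

-- ===== CLAIM (what is proved, stated in full; the proofs are below) =====
def Claim_equal_split_message_to_int_blocks : Prop := ∀ (message : String) (n : Int), Dom_split_message_to_int_blocks message n → Spec_split_message_to_int_blocks message n (split_message_to_int_blocks message n)

-- ===== LEMMAS AND PROOFS =====

-- fuel-indexed chunker: reference form both loops are reduced to
def chunksF (bs : Int) : Nat → List Int → List Int
  | _, [] => []
  | 0, _ :: _ => []
  | f+1, b :: t => pyFromBytesBE ((b :: t).take bs.toNat) :: chunksF bs f ((b :: t).drop bs.toNat)

theorem chunksF_nil (bs : Int) (f : Nat) : chunksF bs f [] = [] := by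
  cases f <;> rfl

theorem pyRange_nil_pos {a b s : Int} (hs : 0 < s) (hab : b ≤ a) :
    PySem.List.pyRange a b s = [] := by
  rw [PySem.List.pyRange_of_pos a b hs]
  simp [show ¬ a < b by omega]

theorem pyRange_cons_pos {a b s : Int} (hs : 0 < s) (hab : a < b) :
    PySem.List.pyRange a b s = a :: PySem.List.pyRange (a + s) b s := by
  rw [PySem.List.pyRange_of_pos a b hs, PySem.List.pyRange_of_pos (a+s) b hs]
  by_cases h2 : a + s < b
  · have hx : (0:Int) ≤ b - a - 1 := by omega
    have hdiv : (b - a + s - 1) / s = (b - a - 1) / s + 1 := by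
      have := Int.add_mul_ediv_right (b - a - 1) 1 (by omega : s ≠ 0)
      simpa [one_mul] using (by rw [show b - a + s - 1 = b - a - 1 + 1 * s by ring, this])
    have hnn : (0:Int) ≤ (b - a - 1) / s := Int.ediv_nonneg hx (le_of_lt hs)
    rw [if_pos hab, if_pos h2, show b - (a + s) + s - 1 = b - a - 1 by ring]
    rw [hdiv, show ((b - a - 1) / s + 1).toNat = ((b - a - 1) / s).toNat + 1 by omega]
    rw [List.range_succ_eq_map]
    simp only [List.map_cons, List.map_map]
    congr 1
    · push_cast; ring
    · apply List.map_congr_left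
      intro k _
      simp [Function.comp]
      push_cast
      ring
  · -- last (single) element: the count is 1
    have h1 : (1:Int) ≤ (b - a + s - 1) / s := by
      rw [Int.le_ediv_iff_mul_le hs]; omega
    have h2' : (b - a + s - 1) / s < 2 := by
      rw [Int.ediv_lt_iff_lt_mul hs]; omega
    have : (b - a + s - 1) / s = 1 := by omega
    rw [if_pos hab, if_neg h2, this]
    simp

theorem slice_chunk (data : List Int) (i bs : Int) (hi : 0 ≤ i) (hbs : 0 < bs) :
    PySem.List.slice data (some i) (some (i + bs)) = (data.drop i.toNat).take bs.toNat := by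
  rw [PySem.List.slice_toNat data hi (by omega)]
  congr 1
  omega

theorem Aloop (bs : Int) (hbs : 0 < bs) (data : List Int) :
    ∀ (f : Nat) (i : Int) (init : List Int), 0 ≤ i → data.length - i.toNat ≤ f →
      (PySem.List.pyRange i (data.length : Int) bs).foldl
        (fun acc j => acc ++ [pyFromBytesBE (PySem.List.slice data (some j) (some (j + bs)))]) init
      = init ++ chunksF bs f (data.drop i.toNat) := by
  intro f
  induction f with
  | zero =>
    intro i init hi hf
    have hge : (data.length : Int) ≤ i := by omega
    rw [pyRange_nil_pos hbs hge]
    have : data.drop i.toNat = [] := List.drop_eq_nil_of_le (by omega)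
    simp [this, chunksF_nil]
  | succ g ih =>
    intro i init hi hf
    by_cases hlt : i < (data.length : Int)
    · rw [pyRange_cons_pos hbs hlt]
      simp only [List.foldl_cons]
      rw [ih (i + bs) _ (by omega) (by omega)]
      have hne : data.drop i.toNat ≠ [] := by
        apply List.ne_nil_of_length_pos
        simp only [List.length_drop]
        omega
      obtain ⟨b, t, hbt⟩ := List.exists_cons_of_ne_nil hne
      rw [hbt]
      simp only [chunksF]
      rw [← hbt]
      rw [show (i + bs).toNat = i.toNat + bs.toNat by omega, ← List.drop_drop]
      rw [slice_chunk data i bs hi hbs]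
      simp [List.append_assoc]
    · rw [pyRange_nil_pos hbs (by omega)]
      have : data.drop i.toNat = [] := List.drop_eq_nil_of_le (by omega)
      simp [this, chunksF_nil]

theorem Bpartial (bs : Int) (hbs : 0 < bs) :
    ∀ (c : List Int) (blocks : List Int) (acc cnt : Int), 0 ≤ cnt → cnt + c.length < bs →
      c.foldl (bstep bs) (blocks, acc, cnt)
      = (blocks, c.foldl (fun a b => a * 256 + b) acc, cnt + c.length) := by
  intro c
  induction c with
  | nil => intro blocks acc cnt h1 h2; simp
  | cons b t ih =>
    intro blocks acc cnt h1 h2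
    simp only [List.foldl_cons, List.length_cons] at *
    rw [show (bstep bs (blocks, acc, cnt) b) = (blocks, acc * 256 + b, cnt + 1) by
      simp only [bstep]; rw [if_neg (by push_cast at h2 ⊢; omega)]]
    rw [ih blocks (acc * 256 + b) (cnt + 1) (by omega) (by push_cast at h2 ⊢; omega)]
    simp only [Prod.mk.injEq]
    refine ⟨trivial, trivial, by push_cast; ring⟩

theorem Bfull (bs : Int) (hbs : 0 < bs) :
    ∀ (c : List Int) (blocks : List Int) (acc cnt : Int), 0 ≤ cnt → cnt + c.length = bs → c ≠ [] →
      c.foldl (bstep bs) (blocks, acc, cnt)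
      = (blocks ++ [c.foldl (fun a b => a * 256 + b) acc], 0, 0) := by
  intro c
  induction c with
  | nil => intro _ _ _ _ _ h; exact absurd rfl h
  | cons b t ih =>
    intro blocks acc cnt h1 h2 _
    simp only [List.length_cons] at h2
    cases t with
    | nil =>
      simp only [List.foldl_cons, List.foldl_nil]
      rw [show (bstep bs (blocks, acc, cnt) b) = (blocks ++ [acc * 256 + b], 0, 0) by
        simp only [bstep]; rw [if_pos (by simp only [List.length_nil] at h2; push_cast at h2; omega)]]
    | cons b2 t2 =>
      simp only [List.foldl_cons]
      rw [show (bstep bs (blocks, acc, cnt) b) = (blocks, acc * 256 + b, cnt + 1) by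
        simp only [bstep]; rw [if_neg (by simp only [List.length_cons] at h2; push_cast at h2 ⊢; omega)]]
      have := ih blocks (acc * 256 + b) (cnt + 1) (by omega)
        (by simp only [List.length_cons] at h2 ⊢; push_cast at h2 ⊢; omega) (by simp)
      simpa using this

theorem Bloop (bs : Int) (hbs : 0 < bs) :
    ∀ (f : Nat) (l : List Int) (blocks : List Int), l.length ≤ f →
      (let st := l.foldl (bstep bs) (blocks, 0, 0);
       if st.2.2 = 0 then st.1 else st.1 ++ [st.2.1])
      = blocks ++ chunksF bs f l := by
  intro f
  induction f with
  | zero =>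
    intro l blocks h
    have : l = [] := List.eq_nil_of_length_eq_zero (Nat.le_zero.mp h)
    subst this; simp [chunksF_nil]
  | succ g ih =>
    intro l blocks h
    cases hl : l with
    | nil => simp [chunksF_nil]
    | cons b t =>
      subst hl
      by_cases hsmall : ((b :: t).length : Int) < bs
      · rw [show ((b :: t).foldl (bstep bs) (blocks, 0, 0)) =
            (blocks, (b :: t).foldl (fun a b => a * 256 + b) 0, 0 + ((b :: t).length : Int)) from
          Bpartial bs hbs (b :: t) blocks 0 0 le_rfl (by omega)]
        simp only [chunksF]
        have htk : (b :: t).take bs.toNat = b :: t := List.take_of_length_le (by omega)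
        have hdr : (b :: t).drop bs.toNat = [] := List.drop_eq_nil_of_le (by omega)
        rw [htk, hdr, chunksF_nil]
        split_ifs with h0
        · exfalso; simp only [List.length_cons] at h0; push_cast at h0; omega
        · rfl
      · have hbsl : bs.toNat ≤ (b :: t).length := by omega
        have hsplit := List.take_append_drop bs.toNat (b :: t)
        conv_lhs => rw [← hsplit]
        rw [List.foldl_append]
        rw [Bfull bs hbs ((b :: t).take bs.toNat) blocks 0 0 le_rfl
          (by rw [List.length_take]; push_cast; omega)
          (by apply List.ne_nil_of_length_pos; rw [List.length_take]; omega)]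
        rw [ih ((b :: t).drop bs.toNat) _ (by simp only [List.length_drop, List.length_cons] at h ⊢; omega)]
        simp only [chunksF, pyFromBytesBE, List.append_assoc, List.singleton_append]

-- ===== VERDICT (by name: the statement is the Claim_ definition above) =====
theorem split_message_to_int_blocks_spec : Claim_equal_split_message_to_int_blocks := by
  intro message n _
  unfold Spec_split_message_to_int_blocks
  unfold split_message_to_int_blocks split_message_to_int_blocks_alt max_plaintext_bytes
  set data : List Int := message.toList.map (fun c => (c.toNat : Int)) with hdata
  set bs : Int := max 1 (PySem.Int.floordiv ((PySem.Int.bitLength n : Int) - 1) 8) with hbs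
  have hbs1 : 0 < bs := lt_of_lt_of_le one_pos (le_max_left 1 _)
  have hA := Aloop bs hbs1 data data.length 0 [] le_rfl (by omega)
  have hB := Bloop bs hbs1 data.length data [] le_rfl
  simp only [Int.toNat_zero, List.drop_zero, List.nil_append] at hA
  simp only [List.nil_append] at hB
  simp only []
  rw [hA, ← hB]
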